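-- pv_equiv track=rewrite | github.com/trainto/Problem-Solving | src/anagram.py | passwd_verifier
-- ===== SOURCE A (Python) =====
-- def passwd_verifier(device, passwd):
--     if len(device) != len(passwd):
--         return False
--     elif device == passwd:
--         return False
--
--     for c in device:
--         passwd = passwd.replace(c, "", 1)
--
--     if len(passwd) == 0:
--         return True
--
--     return False
-- ===== SOURCE B (Python) =====
-- def passwd_verifier(device, passwd):
--     if device == passwd:
--         return False
--     return sorted(device) == sorted(passwd)
-- ===== Notes on version B (the rewrite author's own statement) =====
-- stated objective: faster
-- what changed: Replaces the repeated one-at-a-time replace() scan that strips device's characters out of passwd with a single sorted(device) == sorted(passwd) comparison after an identity guard.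
import Mathlib
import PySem

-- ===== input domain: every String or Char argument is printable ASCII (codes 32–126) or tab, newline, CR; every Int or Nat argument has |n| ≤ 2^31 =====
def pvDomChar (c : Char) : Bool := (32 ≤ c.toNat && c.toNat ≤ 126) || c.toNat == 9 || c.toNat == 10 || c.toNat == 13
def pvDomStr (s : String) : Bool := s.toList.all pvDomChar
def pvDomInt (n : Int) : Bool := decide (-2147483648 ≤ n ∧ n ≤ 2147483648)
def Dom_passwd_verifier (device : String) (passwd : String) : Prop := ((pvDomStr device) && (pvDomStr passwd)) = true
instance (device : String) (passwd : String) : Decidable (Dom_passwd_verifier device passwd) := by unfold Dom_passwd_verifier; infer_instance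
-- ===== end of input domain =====

-- B replaces A's repeated strip-first-occurrence scan with an identity guard plus sorted(device) == sorted(passwd); objective: simpler.


-- ===== PORT A =====
-- passwd.replace(c, "", 1) with a single-character c: remove the FIRST occurrence of c.
-- Hand-ported (PySem.Str.replace has no count argument); exact for one-char pattern, count=1.
def pyReplaceFirstChar (s : List Char) (c : Char) : List Char :=
  match s with
  | [] => []
  | x :: xs => if x = c then xs else x :: pyReplaceFirstChar xs c

def passwd_verifier (device : String) (passwd : String) : Bool :=
  if PySem.Str.len device ≠ PySem.Str.len passwd then false
  else if device == passwd then false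
  else
    let passwd' := device.toList.foldl (fun p c => pyReplaceFirstChar p c) passwd.toList
    if passwd'.length = 0 then true else false

-- ===== PORT B =====
def passwd_verifier_alt (device : String) (passwd : String) : Bool :=
  if device == passwd then false
  else PySem.List.sorted device.toList (fun x => x) false
         == PySem.List.sorted passwd.toList (fun x => x) false

-- ===== PRECONDITION & SPEC =====
def Spec_passwd_verifier (device : String) (passwd : String) (out : Bool) : Prop := out = passwd_verifier_alt device passwd
instance (device : String) (passwd : String) (out : Bool) : Decidable (Spec_passwd_verifier device passwd out) := by unfold Spec_passwd_verifier; infer_instance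

-- ===== CLAIM (what is proved, stated in full; the proofs are below) =====
def Claim_equal_passwd_verifier : Prop := ∀ (device : String) (passwd : String), Dom_passwd_verifier device passwd → Spec_passwd_verifier device passwd (passwd_verifier device passwd)

-- ===== LEMMAS AND PROOFS =====

theorem pyReplaceFirstChar_eq_erase (s : List Char) (c : Char) :
    pyReplaceFirstChar s c = s.erase c := by
  induction s with
  | nil => rfl
  | cons x xs ih =>
    by_cases h : x = c
    · simp [pyReplaceFirstChar, h]
    · simp [pyReplaceFirstChar, h, ih]

theorem length_foldl_erase_ge (d p : List Char) :
    p.length - d.length ≤ (d.foldl (fun p c => p.erase c) p).length := by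
  induction d generalizing p with
  | nil => simp
  | cons c d' ih =>
    have h := ih (p.erase c)
    have : p.length - 1 ≤ (p.erase c).length := by
      have := @List.length_erase Char _ _ c p
      split_ifs at this <;> omega
    simp only [List.foldl_cons, List.length_cons]
    omega

theorem foldl_erase_eq_nil_iff (d p : List Char) (hlen : p.length = d.length) :
    d.foldl (fun p c => p.erase c) p = [] ↔ p.Perm d := by
  induction d generalizing p with
  | nil =>
    simp at hlen
    simp [hlen]
  | cons c d' ih =>
    simp only [List.foldl_cons]
    by_cases hc : c ∈ p
    · have hl : (p.erase c).length = d'.length := by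
        rw [List.length_erase]
        simp [hc]
        simp at hlen
        omega
      rw [ih _ hl]
      constructor
      · intro h
        exact ((List.cons_perm_iff_perm_erase).mpr ⟨hc, h.symm⟩).symm
      · intro h
        exact ((List.cons_perm_iff_perm_erase).mp h.symm).2.symm
    · constructor
      · intro h
        exfalso
        have h1 := length_foldl_erase_ge d' (p.erase c)
        rw [h] at h1
        rw [List.erase_of_not_mem hc] at h1
        simp at h1 hlen
        omega
      · intro h
        exact absurd (h.mem_iff.mpr (List.mem_cons_self ..)) hc

theorem foldl_replace_eq_nil_iff (d p : List Char) (hlen : p.length = d.length) :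
    d.foldl (fun p c => pyReplaceFirstChar p c) p = [] ↔ p.Perm d := by
  have : (d.foldl (fun p c => pyReplaceFirstChar p c) p)
       = d.foldl (fun p c => p.erase c) p := by
    have hf : (fun (p : List Char) c => pyReplaceFirstChar p c) = (fun p c => p.erase c) := by
      funext p c; exact pyReplaceFirstChar_eq_erase p c
    rw [hf]
  rw [this]
  exact foldl_erase_eq_nil_iff d p hlen

-- ===== VERDICT (by name: the statement is the Claim_ definition above) =====
theorem passwd_verifier_spec : Claim_equal_passwd_verifier := by
  intro device passwd _
  unfold Spec_passwd_verifier passwd_verifier passwd_verifier_alt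
  by_cases heq : device = passwd
  · subst heq
    simp
  · have hne : (device == passwd) = false := beq_eq_false_iff_ne.mpr heq
    by_cases hlen : device.toList.length = passwd.toList.length
    · by_cases hperm : passwd.toList.Perm device.toList
      · have hnil := (foldl_replace_eq_nil_iff device.toList passwd.toList hlen.symm).mpr hperm
        have hs := (PySem.List.sorted_id_eq_sorted_id_iff_perm device.toList passwd.toList).mpr hperm.symm
        have hL : device.length = passwd.length := by simpa using hlen
        simp [hne, hnil, hs, hL]
      · have hnil : device.toList.foldl (fun p c => pyReplaceFirstChar p c) passwd.toList ≠ [] :=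
          fun h => hperm ((foldl_replace_eq_nil_iff device.toList passwd.toList hlen.symm).mp h)
        have hs : ¬ (PySem.List.sorted device.toList (fun x => x) false)
               = PySem.List.sorted passwd.toList (fun x => x) false :=
          fun h => hperm ((PySem.List.sorted_id_eq_sorted_id_iff_perm _ _).mp h).symm
        have hL : device.length = passwd.length := by simpa using hlen
        simp [hne, List.length_eq_zero_iff, hnil, hs, hL]
    · have hL : ¬ device.length = passwd.length := by simpa using hlen
      have hs : ¬ (PySem.List.sorted device.toList (fun x => x) false)
             = PySem.List.sorted passwd.toList (fun x => x) false :=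
        fun h => hlen ((PySem.List.sorted_id_eq_sorted_id_iff_perm _ _).mp h).length_eq
      simp [hne, hs, hL]
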